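-- pv_equiv track=rewrite | github.com/sergioahp/logit-amplification | src/logit_amplification.py | adjust_doc_lens_for_range
-- ===== SOURCE A (Python) =====
-- def adjust_doc_lens_for_range(doc_lens, start_pos, num_tokens):
--     """
--     Adjust document lengths for a specific range of tokens.
--
--     Args:
--         doc_lens: Original document lengths (list of ints)
--         start_pos: Starting token position in the original sequence
--         num_tokens: Number of tokens in the range (e.g., T for one sequence)
--
--     Returns:
--         List of adjusted document lengths that fit within the range
--     """
--     adjusted_lens = []
--     current_pos = 0
--     end_pos = start_pos + num_tokens
--
--     for doc_len in doc_lens: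
--         doc_start = current_pos
--         doc_end = current_pos + doc_len
--
--         # Check if this document overlaps with our range
--         if doc_end <= start_pos or doc_start >= end_pos:
--             # Document is completely outside our range
--             current_pos = doc_end
--             continue
--
--         # Calculate the overlap
--         overlap_start = max(doc_start, start_pos)
--         overlap_end = min(doc_end, end_pos)
--         overlap_len = overlap_end - overlap_start
--
--         if overlap_len > 0:
--             adjusted_lens.append(overlap_len)
--
--         current_pos = doc_end
--
--         # Stop if we've passed our range
--         if doc_start >= end_pos:
--             break
--
--     return adjusted_lens
-- ===== SOURCE B (Python) =====
-- def adjust_doc_lens_for_range(doc_lens, start_pos, num_tokens):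
--     # Divide and conquer in window-relative coordinates: a half's overlaps are
--     # computed independently after translating the window by the left half's total.
--     def go(docs, lo, hi):
--         if not docs:
--             return []
--         if len(docs) == 1:
--             ov = min(docs[0], hi) - max(0, lo)
--             return [ov] if ov > 0 else []
--         mid = len(docs) // 2
--         s = sum(docs[:mid])
--         return go(docs[:mid], lo, hi) + go(docs[mid:], lo - s, hi - s)
--     return go(doc_lens, start_pos, start_pos + num_tokens)
-- ===== Notes on version B (the rewrite author's own statement) =====
-- stated objective: alternative
-- what changed: Replaces A's single stateful left-to-right scan with an absolute running position by a divide-and-conquer recursion in window-relative coordinates: the list is split in halves, each half is solved independently after translating the window by the left half's total length, and results are concatenated; there is no running-position accumulator and no skip/break branching.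
import Mathlib
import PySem

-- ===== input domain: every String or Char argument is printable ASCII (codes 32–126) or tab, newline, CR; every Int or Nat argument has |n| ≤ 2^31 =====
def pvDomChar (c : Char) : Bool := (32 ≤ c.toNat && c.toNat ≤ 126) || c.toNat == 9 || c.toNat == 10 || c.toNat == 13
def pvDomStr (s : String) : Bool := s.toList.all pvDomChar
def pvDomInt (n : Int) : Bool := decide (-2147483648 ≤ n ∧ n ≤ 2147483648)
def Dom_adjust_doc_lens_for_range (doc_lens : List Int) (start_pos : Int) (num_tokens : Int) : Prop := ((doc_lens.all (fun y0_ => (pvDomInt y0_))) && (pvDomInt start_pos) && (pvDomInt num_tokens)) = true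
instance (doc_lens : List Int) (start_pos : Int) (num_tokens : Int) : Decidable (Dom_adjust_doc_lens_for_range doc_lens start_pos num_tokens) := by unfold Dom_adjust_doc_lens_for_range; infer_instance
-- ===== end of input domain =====

-- B replaces A's stateful absolute-position scan by divide-and-conquer in
-- window-relative coordinates (objective: alternative).

-- ===== PORT A =====
-- literal transliteration of A's loop: state = (current_pos, adjusted_lens),
-- the continue/append branches and the (dead) break in the same order as the Python
def adjLoopA (start_pos end_pos : Int) : List Int → Int → List Int → List Int
  | [], _, acc => acc
  | doc_len :: rest, current_pos, acc =>
    let doc_start := current_pos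
    let doc_end := current_pos + doc_len
    if doc_end ≤ start_pos ∨ doc_start ≥ end_pos then
      adjLoopA start_pos end_pos rest doc_end acc
    else
      let overlap_len := min doc_end end_pos - max doc_start start_pos
      let acc' := if overlap_len > 0 then acc ++ [overlap_len] else acc
      if doc_start ≥ end_pos then acc' else adjLoopA start_pos end_pos rest doc_end acc'

def adjust_doc_lens_for_range (doc_lens : List Int) (start_pos : Int) (num_tokens : Int) : List Int :=
  adjLoopA start_pos (start_pos + num_tokens) doc_lens 0 []

-- ===== PORT B =====
-- Source B's nested 'go': split in halves, translate the window by the left half's sum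
def goB (docs : List Int) (lo hi : Int) : List Int :=
  match h : docs with
  | [] => []
  | [d] => if min d hi - max 0 lo > 0 then [min d hi - max 0 lo] else []
  | _ :: _ :: _ =>
    let mid := docs.length / 2
    let s := (docs.take mid).sum
    goB (docs.take mid) lo hi ++ goB (docs.drop mid) (lo - s) (hi - s)
termination_by docs.length
decreasing_by
  · subst h; simp; omega
  · subst h; simp; omega

def adjust_doc_lens_for_range_alt (doc_lens : List Int) (start_pos : Int) (num_tokens : Int) : List Int :=
  goB doc_lens start_pos (start_pos + num_tokens)

-- ===== PRECONDITION & SPEC =====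
def Spec_adjust_doc_lens_for_range (doc_lens : List Int) (start_pos : Int) (num_tokens : Int) (out : List Int) : Prop := out = adjust_doc_lens_for_range_alt doc_lens start_pos num_tokens
instance (doc_lens : List Int) (start_pos : Int) (num_tokens : Int) (out : List Int) : Decidable (Spec_adjust_doc_lens_for_range doc_lens start_pos num_tokens out) := by unfold Spec_adjust_doc_lens_for_range; infer_instance

-- ===== CLAIM (what is proved, stated in full; the proofs are below) =====
def Claim_equal_adjust_doc_lens_for_range : Prop := ∀ (doc_lens : List Int) (start_pos : Int) (num_tokens : Int), Dom_adjust_doc_lens_for_range doc_lens start_pos num_tokens → Spec_adjust_doc_lens_for_range doc_lens start_pos num_tokens (adjust_doc_lens_for_range doc_lens start_pos num_tokens)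

-- ===== LEMMAS AND PROOFS =====

-- reference: linear left-to-right overlap list in window-relative coordinates
def olist : List Int → Int → Int → List Int
  | [], _, _ => []
  | d :: rest, lo, hi =>
    (if min d hi - max 0 lo > 0 then [min d hi - max 0 lo] else []) ++ olist rest (lo - d) (hi - d)

theorem olist_append (xs ys : List Int) (lo hi : Int) :
    olist (xs ++ ys) lo hi = olist xs lo hi ++ olist ys (lo - xs.sum) (hi - xs.sum) := by
  induction xs generalizing lo hi with
  | nil => simp [olist]
  | cons d rest ih =>
    simp only [List.cons_append, olist, ih, List.sum_cons, List.append_assoc]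
    congr 2 <;> ring_nf

theorem goB_eq_olist (docs : List Int) (lo hi : Int) : goB docs lo hi = olist docs lo hi := by
  fun_induction goB docs lo hi with
  | case1 lo hi => rfl
  | case2 lo hi d h => simp only [olist, List.append_nil, if_pos h]
  | case3 lo hi d h => simp only [olist, List.append_nil, if_neg h]
  | case4 lo hi a b rest mid s ih1 ih2 =>
    dsimp only
    rw [ih1, ih2, ← olist_append, List.take_append_drop]

theorem adjLoopA_eq_olist (sp ep : Int) (ls : List Int) (c : Int) (acc : List Int) :
    adjLoopA sp ep ls c acc = acc ++ olist ls (sp - c) (ep - c) := by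
  induction ls generalizing c acc with
  | nil => simp [adjLoopA, olist]
  | cons d rest ih =>
    simp only [adjLoopA, olist]
    have hmin : min (c + d) ep = c + min d (ep - c) := by omega
    have hmax : max c sp = c + max 0 (sp - c) := by omega
    by_cases hskip : c + d ≤ sp ∨ c ≥ ep
    · have hno : ¬ (min d (ep - c) - max 0 (sp - c) > 0) := by omega
      rw [if_pos hskip, ih, if_neg hno, List.nil_append, sub_sub, sub_sub]
    · rw [if_neg hskip]
      push Not at hskip
      have hlt : ¬ (c ≥ ep) := by omega
      rw [if_neg hlt, ih]
      have hov : min (c + d) ep - max c sp = min d (ep - c) - max 0 (sp - c) := by omega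
      by_cases hpos : min d (ep - c) - max 0 (sp - c) > 0
      · rw [if_pos (by omega : min (c + d) ep - max c sp > 0), if_pos hpos, hov,
            sub_sub, sub_sub, List.append_assoc]
      · rw [if_neg (by omega : ¬ min (c + d) ep - max c sp > 0), if_neg hpos,
            List.nil_append, sub_sub, sub_sub]

-- ===== VERDICT (by name: the statement is the Claim_ definition above) =====
theorem adjust_doc_lens_for_range_spec : Claim_equal_adjust_doc_lens_for_range := by
  intro doc_lens start_pos num_tokens _hDom
  unfold Spec_adjust_doc_lens_for_range adjust_doc_lens_for_range adjust_doc_lens_for_range_alt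
  rw [adjLoopA_eq_olist, goB_eq_olist]
  simp
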